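-- pv_equiv track=rewrite | github.com/Arsen1302/Code-copy-detector | TestData/solutions/problem_412_3.py | solution_412_3
-- ===== SOURCE A (Python) =====
-- def solution_412_3(s: str) -> int:
--     prev , curr , res = 0 , 1 , 0
--
--     for i in range(1,len(s)):
--         if s[i-1] == s[i]:
--             curr +=1
--         else:
--             prev = curr
--             curr = 1
--         if prev >= curr:
--             res+=1
--     return res
-- ===== SOURCE B (Python) =====
-- def solution_412_3(s: str) -> int:
--     if not s:
--         return 0
--     groups = []
--     cnt = 1
--     for i in range(1, len(s)):
--         if s[i] == s[i - 1]:
--             cnt += 1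
--         else:
--             groups.append(cnt)
--             cnt = 1
--     groups.append(cnt)
--     res = 0
--     for a, b in zip(groups, groups[1:]):
--         res += min(a, b)
--     return res
-- ===== Notes on version B (the rewrite author's own statement) =====
-- stated objective: alternative
-- what changed: A's fused single pass tracking prev/curr run counters and adding 1 per qualifying position is replaced by building an explicit run-length table of the string and summing min over adjacent run lengths.
import Mathlib
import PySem

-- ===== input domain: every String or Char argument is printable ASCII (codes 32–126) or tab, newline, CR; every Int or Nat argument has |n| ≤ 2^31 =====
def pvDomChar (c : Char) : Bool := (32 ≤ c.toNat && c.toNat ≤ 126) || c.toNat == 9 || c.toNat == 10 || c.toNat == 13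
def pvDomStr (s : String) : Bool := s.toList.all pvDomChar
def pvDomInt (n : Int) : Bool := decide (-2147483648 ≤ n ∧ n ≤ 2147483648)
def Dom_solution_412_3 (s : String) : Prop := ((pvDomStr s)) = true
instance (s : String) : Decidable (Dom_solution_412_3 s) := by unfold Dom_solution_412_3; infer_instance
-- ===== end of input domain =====

-- B replaces A's fused prev/curr/res single pass by an explicit run-length table followed by
-- a pairwise min sum over adjacent run lengths (objective: alternative decomposition, same cost).

-- ===== PORT A =====
def solution_412_3 (s : String) : Int :=
  let l := s.toList
  let st := (PySem.List.pyRange 1 (PySem.Str.len s) 1).foldl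
    (fun (st : Int × Int × Int) i =>
      let pc := if PySem.List.pyGetD l (i - 1) ' ' == PySem.List.pyGetD l i ' '
                then (st.1, st.2.1 + 1) else (st.2.1, (1 : Int))
      (pc.1, pc.2, if pc.1 ≥ pc.2 then st.2.2 + 1 else st.2.2))
    ((0 : Int), (1 : Int), (0 : Int))
  st.2.2

-- ===== PORT B =====
def solution_412_3_alt (s : String) : Int :=
  if PySem.Str.len s == 0 then 0
  else
    let l := s.toList
    let st := (PySem.List.pyRange 1 (PySem.Str.len s) 1).foldl
      (fun (st : List Int × Int) i =>
        if PySem.List.pyGetD l i ' ' == PySem.List.pyGetD l (i - 1) ' '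
        then (st.1, st.2 + 1) else (st.1 ++ [st.2], (1 : Int)))
      ([], 1)
    let groups := st.1 ++ [st.2]
    (groups.zip groups.tail).foldl (fun r p => r + min p.1 p.2) 0

-- ===== PRECONDITION & SPEC =====
def Spec_solution_412_3 (s : String) (out : Int) : Prop := out = solution_412_3_alt s
instance (s : String) (out : Int) : Decidable (Spec_solution_412_3 s out) := by unfold Spec_solution_412_3; infer_instance

-- ===== CLAIM (what is proved, stated in full; the proofs are below) =====
def Claim_equal_solution_412_3 : Prop := ∀ (s : String), Dom_solution_412_3 s → Spec_solution_412_3 s (solution_412_3 s)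

-- ===== LEMMAS AND PROOFS =====

/-- A's loop body, as a function of the adjacent character pair `(s[i-1], s[i])`. -/
def pvStepA (st : Int × Int × Int) (p : Char × Char) : Int × Int × Int :=
  let pc := if p.1 == p.2 then (st.1, st.2.1 + 1) else (st.2.1, (1 : Int))
  (pc.1, pc.2, if pc.1 ≥ pc.2 then st.2.2 + 1 else st.2.2)

/-- B's grouping loop body, as a function of the adjacent character pair `(s[i-1], s[i])`. -/
def pvStepB (st : List Int × Int) (p : Char × Char) : List Int × Int :=
  if p.2 == p.1 then (st.1, st.2 + 1) else (st.1 ++ [st.2], (1 : Int))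

/-- Run lengths of the string whose current run is `n` copies of `c`, followed by `xs`. -/
def pvRuns (c : Char) (n : Int) : List Char → List Int
  | [] => [n]
  | x :: xs => if x == c then pvRuns c (n + 1) xs else n :: pvRuns x 1 xs

/-- Sum of `min` over adjacent pairs. -/
def pvPairSum : List Int → Int
  | a :: b :: t => min a b + pvPairSum (b :: t)
  | _ => 0

lemma pvRuns_shape (xs : List Char) : ∀ c n, ∃ m t, pvRuns c n xs = m :: t ∧ n ≤ m := by
  induction xs with
  | nil => intro c n; exact ⟨n, [], rfl, le_refl n⟩
  | cons x xs ih =>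
    intro c n
    by_cases h : x == c
    · obtain ⟨m, t, he, hle⟩ := ih c (n + 1)
      exact ⟨m, t, by simp [pvRuns, h, he], by omega⟩
    · exact ⟨n, pvRuns x 1 xs, by simp [pvRuns, h], le_refl n⟩

/-- The index list `range(1, len l)` read through `(l[i-1], l[i])` is the adjacent-pair list. -/
lemma pvRange_map_pair (l : List Char) (d : Char) :
    (PySem.List.pyRange 1 (l.length : Int) 1).map
      (fun j => (PySem.List.pyGetD l (j - 1) d, PySem.List.pyGetD l j d)) = l.zip l.tail := by
  apply List.ext_getElem
  · simp [PySem.List.length_pyRange_one]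
  · intro k h1 h2
    simp only [List.getElem_map, PySem.List.getElem_pyRange_one, List.getElem_zip]
    have hk : k < l.length - 1 := by
      simpa [PySem.List.length_pyRange_one] using h1
    simp only [Prod.mk.injEq]
    refine ⟨?_, ?_⟩
    · have he : (1 : Int) + k - 1 = ((k : Nat) : Int) := by omega
      rw [he, PySem.List.pyGetD_natCast]
      exact List.getD_eq_getElem l d (by omega)
    · have he : (1 : Int) + k = ((k + 1 : Nat) : Int) := by push_cast; ring
      rw [he, PySem.List.pyGetD_natCast, List.getD_eq_getElem l d (show k + 1 < l.length by omega)]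
      simp [List.getElem_tail]

lemma pvFoldA (rest : List Char) : ∀ c (prev curr res : Int), 1 ≤ curr →
    (((c :: rest).zip rest).foldl pvStepA (prev, curr, res)).2.2
      = res + pvPairSum (prev :: pvRuns c curr rest) - min prev curr := by
  induction rest with
  | nil => intro c prev curr res h; simp [pvRuns, pvPairSum]
  | cons x xs ih =>
    intro c prev curr res h
    by_cases hx : x == c
    · have hxe : x = c := beq_iff_eq.mp hx
      subst hxe
      have hstep : pvStepA (prev, curr, res) (x, x)
          = (prev, curr + 1, if prev ≥ curr + 1 then res + 1 else res) := by
        simp [pvStepA]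
      rw [List.zip_cons_cons, List.foldl_cons, hstep, ih x prev (curr + 1) _ (by omega)]
      have hr : pvRuns x curr (x :: xs) = pvRuns x (curr + 1) xs := by simp [pvRuns]
      rw [hr]
      split_ifs with hge <;> simp only [ge_iff_le] at hge <;> omega
    · have hstep : pvStepA (prev, curr, res) (c, x)
          = (curr, 1, if curr ≥ 1 then res + 1 else res) := by
        have : (c == x) = false := by simp_all [BEq.comm]
        simp [pvStepA, this]
      rw [List.zip_cons_cons, List.foldl_cons, hstep, ih x curr 1 _ (by omega)]
      have hr : pvRuns c curr (x :: xs) = curr :: pvRuns x 1 xs := by simp [pvRuns, hx]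
      rw [hr]
      obtain ⟨m, t, he, _⟩ := pvRuns_shape xs x 1
      rw [he]
      simp only [pvPairSum]
      split_ifs with hge <;> simp only [ge_iff_le] at hge <;> omega

lemma pvFoldB (rest : List Char) : ∀ c (gs : List Int) (n : Int),
    (((c :: rest).zip rest).foldl pvStepB (gs, n)).1
        ++ [(((c :: rest).zip rest).foldl pvStepB (gs, n)).2]
      = gs ++ pvRuns c n rest := by
  induction rest with
  | nil => intro c gs n; simp [pvRuns]
  | cons x xs ih =>
    intro c gs n
    by_cases hx : x == c
    · have hxe : x = c := beq_iff_eq.mp hx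
      subst hxe
      have hstep : pvStepB (gs, n) (x, x) = (gs, n + 1) := by simp [pvStepB]
      rw [List.zip_cons_cons, List.foldl_cons, hstep, ih x gs (n + 1)]
      have hr : pvRuns x n (x :: xs) = pvRuns x (n + 1) xs := by simp [pvRuns]
      rw [hr]
    · have hstep : pvStepB (gs, n) (c, x) = (gs ++ [n], 1) := by simp [pvStepB, hx]
      rw [List.zip_cons_cons, List.foldl_cons, hstep, ih x (gs ++ [n]) 1]
      simp [pvRuns, hx]

lemma pvFoldMin (g : List Int) : ∀ r : Int,
    (g.zip g.tail).foldl (fun r p => r + min p.1 p.2) r = r + pvPairSum g := by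
  induction g with
  | nil => intro r; simp [pvPairSum]
  | cons a g ih =>
    intro r
    cases g with
    | nil => simp [pvPairSum]
    | cons b t =>
      have := ih (r + min a b)
      simp only [List.tail_cons] at this ⊢
      rw [List.zip_cons_cons, List.foldl_cons, this]
      simp only [pvPairSum]
      omega

-- ===== VERDICT (by name: the statement is the Claim_ definition above) =====
theorem solution_412_3_spec : Claim_equal_solution_412_3 := by
  intro s _
  unfold Spec_solution_412_3 solution_412_3 solution_412_3_alt
  cases hl : s.toList with
  | nil =>
    simp only [PySem.Str.len_eq, hl]
    rfl
  | cons c rest =>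
    simp only [PySem.Str.len_eq, hl]
    have hne : ((((c :: rest).length : Nat) : Int) == 0) = false := by simp; omega
    rw [hne]
    simp only [Bool.false_eq_true, if_false]
    have kA : (PySem.List.pyRange 1 (((c :: rest).length : Nat) : Int) 1).foldl
        (fun (st : Int × Int × Int) i =>
          let pc := if PySem.List.pyGetD (c :: rest) (i - 1) ' ' == PySem.List.pyGetD (c :: rest) i ' '
                    then (st.1, st.2.1 + 1) else (st.2.1, (1 : Int))
          (pc.1, pc.2, if pc.1 ≥ pc.2 then st.2.2 + 1 else st.2.2))
        ((0 : Int), (1 : Int), (0 : Int))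
        = ((c :: rest).zip rest).foldl pvStepA (0, 1, 0) := by
      have := pvRange_map_pair (c :: rest) ' '
      simp only [List.tail_cons] at this
      rw [← this, List.foldl_map]
      rfl
    have kB : (PySem.List.pyRange 1 (((c :: rest).length : Nat) : Int) 1).foldl
        (fun (st : List Int × Int) i =>
          if PySem.List.pyGetD (c :: rest) i ' ' == PySem.List.pyGetD (c :: rest) (i - 1) ' '
          then (st.1, st.2 + 1) else (st.1 ++ [st.2], (1 : Int)))
        ([], 1)
        = ((c :: rest).zip rest).foldl pvStepB ([], 1) := by
      have := pvRange_map_pair (c :: rest) ' '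
      simp only [List.tail_cons] at this
      rw [← this, List.foldl_map]
      rfl
    rw [kA, kB, pvFoldA rest c 0 1 0 (by omega)]
    have hB := pvFoldB rest c [] 1
    simp only [List.nil_append] at hB
    rw [hB, pvFoldMin]
    obtain ⟨m, t, he, hm⟩ := pvRuns_shape rest c 1
    rw [he]
    simp only [pvPairSum]
    omega
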